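-- pv_equiv track=rewrite | github.com/jitingcn/Python_learning | exercises/school/180711.py | participle
-- ===== SOURCE A (Python) =====
-- import string
--
-- def participle(s1=None, s2=None, x=0):
--     if s1 is None and s2 is None:
--         return ""
--     elif s2 is None:
--         word = s1
--     else:
--         word = s1 + " " + s2
--     if x == 1:
--         word = word.lower()
--     del_list = string.punctuation + string.digits
--     for i in del_list:
--         word = word.replace(i, "")
--     return word
-- ===== SOURCE B (Python) =====
-- import string
--
-- _DELETE = frozenset(string.punctuation) | frozenset(string.digits)
--
-- def participle(s1=None, s2=None, x=0):
--     if s1 is None and s2 is None: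
--         return ""
--     word = s1 if s2 is None else s1 + " " + s2
--     out = []
--     for c in word:
--         if c not in _DELETE:
--             out.append(c.lower() if x == 1 else c)
--     return "".join(out)
-- ===== Notes on version B (the rewrite author's own statement) =====
-- stated objective: alternative
-- what changed: Replaces A's staged pipeline (lowercase the whole word, then ~42 word.replace calls, each a full-string scan-and-rebuild) with one explicit character loop over word carrying an accumulator: each char is tested once against a frozenset and lowercased individually as it is kept.
import Mathlib
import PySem

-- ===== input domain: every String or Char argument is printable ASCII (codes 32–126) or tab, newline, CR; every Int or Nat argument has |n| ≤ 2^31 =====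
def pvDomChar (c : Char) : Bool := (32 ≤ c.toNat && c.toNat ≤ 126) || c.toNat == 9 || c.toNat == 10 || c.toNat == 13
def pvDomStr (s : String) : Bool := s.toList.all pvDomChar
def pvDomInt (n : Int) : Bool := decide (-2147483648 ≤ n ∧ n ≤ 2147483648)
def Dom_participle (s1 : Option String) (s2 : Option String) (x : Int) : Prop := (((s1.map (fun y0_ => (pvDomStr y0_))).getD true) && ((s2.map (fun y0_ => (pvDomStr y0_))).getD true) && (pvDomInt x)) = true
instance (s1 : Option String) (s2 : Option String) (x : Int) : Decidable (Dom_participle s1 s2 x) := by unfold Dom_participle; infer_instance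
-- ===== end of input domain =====

-- B replaces A's staged pipeline (lower whole word, then one word.replace scan per deleted
-- character) with a single explicit character loop carrying an accumulator (objective: alternative).


-- ===== PORT A =====
-- string.punctuation and string.digits
def punctChars : List Char := "!\"#$%&'()*+,-./:;<=>?@[\\]^_`{|}~".toList
def digitChars : List Char := "0123456789".toList
-- del_list = string.punctuation + string.digits
def delChars : List Char := punctChars ++ digitChars

def participle (s1 : Option String) (s2 : Option String) (x : Int) : String :=
  if s1 = none ∧ s2 = none then ""
  else
    let word : String :=
      match s2 with
      | none => s1.getD ""                 -- s1 = some here on Pre_ (s1 = none raises TypeError in Python)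
      | some b => s1.getD "" ++ " " ++ b
    let word := if x = 1 then PySem.Str.lower word else word
    -- for i in del_list: word = word.replace(i, "")
    delChars.foldl (fun w c => PySem.Str.replace w (String.singleton c) "") word

-- ===== PORT B =====
-- the explicit loop of Source B: out = []; for c in word: if c not in _DELETE: out.append(...)
def keepLoop (x : Int) : List Char → List Char → List Char
  | acc, [] => acc.reverse
  | acc, c :: rest =>
      if punctChars.contains c || digitChars.contains c then keepLoop x acc rest
      else keepLoop x ((if x = 1 then PySem.Chars.lowerChar c else c) :: acc) rest

def participle_alt (s1 : Option String) (s2 : Option String) (x : Int) : String :=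
  match s1, s2 with
  | none, none => ""
  | some a, none => String.ofList (keepLoop x [] a.toList)
  | _, some b => String.ofList (keepLoop x [] (Option.getD s1 "" ++ " " ++ b).toList)

-- ===== PRECONDITION & SPEC =====
-- Pre_ excludes only s1 = None with s2 a string, where A raises TypeError (None + " "); B raises there too.
def Pre_participle (s1 : Option String) (s2 : Option String) (x : Int) : Prop :=
  s1 = none → s2 = none
instance (s1 : Option String) (s2 : Option String) (x : Int) : Decidable (Pre_participle s1 s2 x) := by unfold Pre_participle; infer_instance

def pvWitness_participle : Option String × Option String × Int := (some "Hello, World! 42", some "Bye.", 1)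

def Spec_participle (s1 : Option String) (s2 : Option String) (x : Int) (out : String) : Prop := out = participle_alt s1 s2 x
instance (s1 : Option String) (s2 : Option String) (x : Int) (out : String) : Decidable (Spec_participle s1 s2 x out) := by unfold Spec_participle; infer_instance

-- ===== CLAIM =====
def Claim_equal_participle : Prop := ∀ (s1 : Option String) (s2 : Option String) (x : Int), Dom_participle s1 s2 x → Pre_participle s1 s2 x → Spec_participle s1 s2 x (participle s1 s2 x)

-- ===== LEMMAS AND PROOFS =====

-- replacing a single character with "" = filtering that character out
theorem replace_go_single (ch : Char) :
    ∀ (fuel : Nat) (l acc : List Char), l.length ≤ fuel →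
      PySem.Chars.replace.go [ch] [] fuel l acc = acc.reverse ++ l.filter (fun c => c != ch) := by
  intro fuel
  induction fuel with
  | zero =>
    intro l acc h
    have : l = [] := List.length_eq_zero_iff.mp (Nat.le_zero.mp h)
    subst this
    simp [PySem.Chars.replace.go]
  | succ n ih =>
    intro l acc h
    cases l with
    | nil => simp [PySem.Chars.replace.go]
    | cons c t =>
      simp only [PySem.Chars.replace.go]
      by_cases hc : c = ch
      · subst hc
        have hpre : List.isPrefixOf [c] (c :: t) = true := by
          simp [List.isPrefixOf]
        rw [if_pos hpre]
        have ht : t.length ≤ n := by simpa using Nat.le_of_succ_le_succ h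
        simpa using ih t acc ht
      · have hpre : List.isPrefixOf [ch] (c :: t) = false := by
          simp [List.isPrefixOf]
          intro hcc; exact absurd hcc.symm hc
        rw [if_neg (by simp [hpre])]
        have ht : t.length ≤ n := by simpa using Nat.le_of_succ_le_succ h
        rw [ih t (c :: acc) ht]
        simp [hc]

theorem replace_single (ch : Char) (l : List Char) :
    PySem.Chars.replace l [ch] [] = l.filter (fun c => c != ch) := by
  simp only [PySem.Chars.replace, List.isEmpty_cons]
  simpa using replace_go_single ch l.length l [] le_rfl

-- folding single-character filters over a delete list = one filter against membership in the list
theorem foldl_filter_eq_filter_not_mem (del : List Char) :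
    ∀ (l : List Char),
      del.foldl (fun w c => w.filter (fun d => d != c)) l
        = l.filter (fun c => !(del.contains c)) := by
  induction del with
  | nil => intro l; simp
  | cons ch del ih =>
    intro l
    simp only [List.foldl_cons, ih, List.filter_filter]
    apply List.filter_congr
    intro c _
    by_cases h : c = ch <;> simp [h]

theorem foldl_replace_eq_filter (del : List Char) (w : String) :
    del.foldl (fun w c => PySem.Str.replace w (String.singleton c) "") w
      = String.ofList (w.toList.filter (fun c => !(del.contains c))) := by
  have key : ∀ (del : List Char) (l : List Char),
      del.foldl (fun w c => PySem.Str.replace w (String.singleton c) "") (String.ofList l)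
        = String.ofList (del.foldl (fun w c => w.filter (fun d => d != c)) l) := by
    intro del
    induction del with
    | nil => intro l; simp
    | cons ch del ih =>
      intro l
      simp only [List.foldl_cons]
      have : PySem.Str.replace (String.ofList l) (String.singleton ch) ""
          = String.ofList (l.filter (fun d => d != ch)) := by
        simp [PySem.Str.replace, String.toList_singleton, replace_single]
      rw [this, ih]
  have hw : w = String.ofList w.toList := by simp
  calc del.foldl (fun w c => PySem.Str.replace w (String.singleton c) "") w
      = del.foldl (fun w c => PySem.Str.replace w (String.singleton c) "") (String.ofList w.toList) := by rw [← hw]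
    _ = String.ofList (del.foldl (fun w c => w.filter (fun d => d != c)) w.toList) := key del w.toList
    _ = String.ofList (w.toList.filter (fun c => !(del.contains c))) := by
          rw [foldl_filter_eq_filter_not_mem]

-- every deleted character's code avoids [65,90] and [97,122]
theorem delChars_codes : ∀ d ∈ delChars, d.toNat < 65 ∨ (90 < d.toNat ∧ d.toNat < 97) ∨ 122 < d.toNat := by
  have h : delChars.all
      (fun d => decide (d.toNat < 65 ∨ (90 < d.toNat ∧ d.toNat < 97) ∨ 122 < d.toNat)) = true := by
    decide
  intro d hd
  simpa using List.all_eq_true.mp h d hd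

theorem isupper_toNat (c : Char) (h : PySem.Chars.isupper c = true) :
    65 ≤ c.toNat ∧ c.toNat ≤ 90 := by
  simp only [PySem.Chars.isupper, Bool.and_eq_true, decide_eq_true_eq] at h
  obtain ⟨h1, h2⟩ := h
  constructor
  · exact h1
  · exact h2

theorem toNat_ofNat_lower (n : Nat) (h : n < 127) : (Char.ofNat n).toNat = n := by
  have hv : Nat.isValidChar n := Or.inl (by omega)
  rw [Char.toNat_ofNat]
  simp [hv]

theorem not_mem_del_of_range (c : Char)
    (h : (65 ≤ c.toNat ∧ c.toNat ≤ 90) ∨ (97 ≤ c.toNat ∧ c.toNat ≤ 122)) :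
    delChars.contains c = false := by
  by_contra hc
  have hmem : c ∈ delChars := by
    have := Bool.not_eq_false (delChars.contains c) |>.mp hc
    exact List.contains_iff_mem.mp this
  have := delChars_codes c hmem
  omega

-- deleting is insensitive to lowercasing
theorem mem_del_lower (c : Char) :
    delChars.contains (PySem.Chars.lowerChar c) = delChars.contains c := by
  unfold PySem.Chars.lowerChar
  by_cases h : PySem.Chars.isupper c = true
  · rw [if_pos h]
    obtain ⟨h1, h2⟩ := isupper_toNat c h
    have hof : (Char.ofNat (c.toNat + 32)).toNat = c.toNat + 32 :=
      toNat_ofNat_lower _ (by omega)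
    rw [not_mem_del_of_range c (Or.inl ⟨h1, h2⟩),
        not_mem_del_of_range _ (Or.inr (by omega))]
  · rw [if_neg h]

-- B's loop computes the reversed-accumulator filter-and-map
theorem keepLoop_spec (x : Int) :
    ∀ (l acc : List Char),
      keepLoop x acc l
        = acc.reverse ++ (l.filter (fun c => !(delChars.contains c))).map
            (fun c => if x = 1 then PySem.Chars.lowerChar c else c) := by
  intro l
  induction l with
  | nil => intro acc; simp [keepLoop]
  | cons c t ih =>
    intro acc
    simp only [keepLoop]
    have hdel : (punctChars.contains c || digitChars.contains c) = delChars.contains c := by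
      simp [delChars]
    by_cases h : delChars.contains c = true
    · rw [if_pos (by rw [hdel]; exact h), ih]
      have hm : c ∈ delChars := List.contains_iff_mem.mp h
      simp [hm]
    · have h' : delChars.contains c = false := Bool.not_eq_true _ |>.mp h
      have hm : c ∉ delChars := fun hmem => h (List.contains_iff_mem.mpr hmem)
      rw [if_neg (by rw [hdel, h']; simp), ih]
      simp [hm]

-- filtering after pointwise lowering = lowering the filtered characters
theorem filter_lower_comm (l : List Char) :
    (l.map PySem.Chars.lowerChar).filter (fun c => !(delChars.contains c))
      = (l.filter (fun c => !(delChars.contains c))).map PySem.Chars.lowerChar := by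
  rw [List.filter_map]
  congr 1
  apply List.filter_congr
  intro c _
  simp only [Function.comp_apply]
  rw [mem_del_lower]

-- A's whole tail (optional lower, then the replace fold) equals B's loop on the same word
theorem tail_eq (x : Int) (w : String) :
    delChars.foldl (fun w c => PySem.Str.replace w (String.singleton c) "")
        (if x = 1 then PySem.Str.lower w else w)
      = String.ofList (keepLoop x [] w.toList) := by
  rw [keepLoop_spec]
  by_cases hx : x = 1
  · rw [if_pos hx, foldl_replace_eq_filter]
    simp only [hx, PySem.Str.toList_lower, PySem.Chars.lower]
    rw [filter_lower_comm]
    simp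
  · rw [if_neg hx, foldl_replace_eq_filter]
    simp [hx]

-- ===== VERDICT =====
theorem participle_spec : Claim_equal_participle := by
  intro s1 s2 x _ hpre
  unfold Spec_participle participle participle_alt
  cases s1 with
  | none =>
    have h2 : s2 = none := hpre rfl
    subst h2
    simp
  | some a =>
    cases s2 with
    | none =>
      rw [if_neg (by simp)]
      simpa using tail_eq x a
    | some b =>
      rw [if_neg (by simp)]
      simpa using tail_eq x (a ++ " " ++ b)
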